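-- pv_equiv track=rewrite | github.com/Brahamanbtp/KeyCrypt-Shield-X | src/security/secure_memory.py | _constant_time_compare_buffers
-- ===== SOURCE A (Python) =====
-- from typing import Any
--
-- def _constant_time_compare_buffers(
--     left: Any,
--     left_size: int,
--     right: Any,
--     right_size: int,
-- ) -> bool:
--     mismatch = left_size ^ right_size
--     max_size = left_size if left_size >= right_size else right_size
--
--     for idx in range(max_size):
--         left_byte = left[idx] if idx < left_size else 0
--         right_byte = right[idx] if idx < right_size else 0
--         mismatch |= (left_byte ^ right_byte)
--
--     return mismatch == 0
-- ===== SOURCE B (Python) =====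
-- def _constant_time_compare_buffers(left, left_size, right, right_size):
--     left_list = [left[i] for i in range(left_size)]
--     right_list = [right[i] for i in range(right_size)]
--     return left_size == right_size and left_list == right_list
-- ===== Notes on version B (the rewrite author's own statement) =====
-- stated objective: simpler
-- what changed: Replaces the XOR/OR mismatch-accumulator scan over range(max_size) with materializing each buffer's declared prefix as a plain list and returning a size check plus structural list equality (dropping the constant-time bit-mask machinery entirely).
import Mathlib
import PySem

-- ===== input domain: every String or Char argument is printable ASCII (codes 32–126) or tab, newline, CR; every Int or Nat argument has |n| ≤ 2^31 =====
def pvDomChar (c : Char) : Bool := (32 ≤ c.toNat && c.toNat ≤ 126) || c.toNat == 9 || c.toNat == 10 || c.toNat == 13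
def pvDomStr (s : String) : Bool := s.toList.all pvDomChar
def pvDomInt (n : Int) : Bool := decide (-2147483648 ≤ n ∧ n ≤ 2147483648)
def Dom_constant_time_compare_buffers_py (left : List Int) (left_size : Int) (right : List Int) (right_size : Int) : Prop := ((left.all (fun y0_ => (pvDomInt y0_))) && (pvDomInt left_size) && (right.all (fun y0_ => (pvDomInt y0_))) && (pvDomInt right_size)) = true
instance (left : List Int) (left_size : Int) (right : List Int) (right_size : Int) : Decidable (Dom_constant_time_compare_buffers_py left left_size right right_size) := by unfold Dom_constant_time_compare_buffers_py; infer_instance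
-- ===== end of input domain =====

-- B drops A's XOR/OR mismatch-mask scan: it materializes each buffer's declared prefix and
-- returns a size check plus structural list equality (objective: simpler).

-- ===== PORT A =====
-- pyGetD is exact here because Pre_ guarantees every index read is in range.
def constant_time_compare_buffers_py (left : List Int) (left_size : Int) (right : List Int) (right_size : Int) : Bool :=
  let mismatch := PySem.Int.bxor left_size right_size
  let max_size := if left_size ≥ right_size then left_size else right_size
  let mismatch := (PySem.List.pyRange 0 max_size 1).foldl (fun m idx =>
      let left_byte := if idx < left_size then PySem.List.pyGetD left idx 0 else 0
      let right_byte := if idx < right_size then PySem.List.pyGetD right idx 0 else 0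
      PySem.Int.bor m (PySem.Int.bxor left_byte right_byte)) mismatch
  mismatch == 0

-- ===== PORT B =====
def constant_time_compare_buffers_py_alt (left : List Int) (left_size : Int) (right : List Int) (right_size : Int) : Bool :=
  let left_list := (PySem.List.pyRange 0 left_size 1).map (fun i => PySem.List.pyGetD left i 0)
  let right_list := (PySem.List.pyRange 0 right_size 1).map (fun i => PySem.List.pyGetD right i 0)
  (left_size == right_size) && (left_list == right_list)

-- ===== PRECONDITION & SPEC =====
-- A (and B) index left[0..left_size-1] and right[0..right_size-1]; outside these bounds both raise IndexError.
def Pre_constant_time_compare_buffers_py (left : List Int) (left_size : Int) (right : List Int) (right_size : Int) : Prop :=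
  left_size ≤ (left.length : Int) ∧ right_size ≤ (right.length : Int)
instance (left : List Int) (left_size : Int) (right : List Int) (right_size : Int) : Decidable (Pre_constant_time_compare_buffers_py left left_size right right_size) := by unfold Pre_constant_time_compare_buffers_py; infer_instance
def pvWitness_constant_time_compare_buffers_py : List Int × Int × List Int × Int := ([7, 9], 2, [7, 9], 2)

def Spec_constant_time_compare_buffers_py (left : List Int) (left_size : Int) (right : List Int) (right_size : Int) (out : Bool) : Prop := out = constant_time_compare_buffers_py_alt left left_size right right_size
instance (left : List Int) (left_size : Int) (right : List Int) (right_size : Int) (out : Bool) : Decidable (Spec_constant_time_compare_buffers_py left left_size right right_size out) := by unfold Spec_constant_time_compare_buffers_py; infer_instance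

-- ===== CLAIM (what is proved, stated in full; the proofs are below) =====
def Claim_equal_constant_time_compare_buffers_py : Prop := ∀ (left : List Int) (left_size : Int) (right : List Int) (right_size : Int), Dom_constant_time_compare_buffers_py left left_size right right_size → Pre_constant_time_compare_buffers_py left left_size right right_size → Spec_constant_time_compare_buffers_py left left_size right right_size (constant_time_compare_buffers_py left left_size right right_size)

-- ===== LEMMAS AND PROOFS =====

lemma nat_or_eq_zero_iff (a b : Nat) : a ||| b = 0 ↔ a = 0 ∧ b = 0 := by
  constructor
  · intro h
    exact ⟨Nat.le_zero.mp (h ▸ Nat.left_le_or), Nat.le_zero.mp (h ▸ Nat.right_le_or)⟩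
  · rintro ⟨rfl, rfl⟩; rfl

lemma bor_eq_zero_iff (a b : Int) : PySem.Int.bor a b = 0 ↔ a = 0 ∧ b = 0 := by
  unfold PySem.Int.bor
  split_ifs with h1 h2 h2
  · rw [show ((↑(a.toNat ||| b.toNat) : Int) = 0 ↔ a.toNat ||| b.toNat = 0) from by omega,
      nat_or_eq_zero_iff]
    omega
  all_goals constructor <;> intro h <;> omega

lemma bxor_eq_zero_iff (a b : Int) : PySem.Int.bxor a b = 0 ↔ a = b := by
  unfold PySem.Int.bxor
  split_ifs with h1 h2 h2
  · rw [show ((↑(a.toNat ^^^ b.toNat) : Int) = 0 ↔ a.toNat ^^^ b.toNat = 0) from by omega,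
      Nat.xor_eq_zero_iff]
    omega
  · constructor <;> intro h <;> omega
  · constructor <;> intro h <;> omega
  · rw [show ((↑((-a-1).toNat ^^^ (-b-1).toNat) : Int) = 0 ↔ (-a-1).toNat ^^^ (-b-1).toNat = 0) from by omega,
      Nat.xor_eq_zero_iff]
    omega

-- A's OR-accumulator is 0 exactly when it starts 0 and every contribution is 0.
lemma foldl_bor_eq_zero (l : List Int) (f : Int → Int) (init : Int) :
    (l.foldl (fun m idx => PySem.Int.bor m (f idx)) init = 0) ↔ (init = 0 ∧ ∀ x ∈ l, f x = 0) := by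
  induction l generalizing init with
  | nil => simp
  | cons a l ih =>
    simp only [List.foldl_cons, ih, bor_eq_zero_iff, List.mem_cons]
    constructor
    · rintro ⟨⟨h1, h2⟩, h3⟩
      exact ⟨h1, fun x hx => hx.elim (fun h => h ▸ h2) (h3 x)⟩
    · rintro ⟨h1, h2⟩
      exact ⟨⟨h1, h2 a (Or.inl rfl)⟩, fun x hx => h2 x (Or.inr hx)⟩

-- ===== VERDICT (by name: the statement is the Claim_ definition above) =====
theorem constant_time_compare_buffers_py_spec : Claim_equal_constant_time_compare_buffers_py := by
  intro left ls right rs _ _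
  unfold Spec_constant_time_compare_buffers_py
  unfold constant_time_compare_buffers_py constant_time_compare_buffers_py_alt
  simp only []
  rw [Bool.eq_iff_iff]
  simp only [beq_iff_eq, Bool.and_eq_true, foldl_bor_eq_zero]
  by_cases h : ls = rs
  · subst h
    simp only [le_refl, if_pos, bxor_eq_zero_iff, true_and, List.map_eq_map_iff]
    constructor <;> intro hall x hx <;>
      have hb := (PySem.List.mem_pyRange_one).mp hx <;>
      have h1 := hall x hx <;>
      simp only [if_pos hb.2] at h1 ⊢ <;> exact h1
  · constructor
    · rintro ⟨h0, -⟩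
      exact absurd ((bxor_eq_zero_iff ls rs).mp h0) h
    · rintro ⟨h0, -⟩
      exact absurd h0 h
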